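/- GENERATED by farm/mkstatement.py from design/units.split.tsv — do not edit.
   THE SPLIT of the proof unit `decode_residue.6b` into `decode_residue.6ba`, `decode_residue.6bb`: the children's statements give the parent's
   UNCHANGED statement (so nothing above the parent — callers, compositions — is touched by the split). -/
import Vorbis.Spec.DecodeResidue6b
import Vorbis.Spec.Units.decode_residue_6b
import Vorbis.Spec.Units.decode_residue_6ba
import Vorbis.Spec.Units.decode_residue_6bb
namespace Vorbis.Spec.Splits
open X86 X86.User Asan

/-- The children of the split unit `decode_residue.6b` prove it, by `Vorbis.Spec.DecodeResidue.Seg6b.of_parts`. -/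
theorem decode_residue_6b
    (h_decode_residue_6ba : Vorbis.Spec.decode_residue_6ba.Statement)
    (h_decode_residue_6bb : Vorbis.Spec.decode_residue_6bb.Statement) :
    Vorbis.Spec.decode_residue_6b.Statement := by
  intro Lay _hLay μ _hμ u₀ _hcode _h_asan_load8_noabort _h_codebook_decode_deinterleave_repeat _h_asan_load4_noabort _h_asan_load1_noabort _h_asan_load2_noabort
  apply Vorbis.Spec.DecodeResidue.Seg6b.of_parts
  · exact h_decode_residue_6ba Lay _hLay μ _hμ u₀ _hcode _h_asan_load8_noabort _h_asan_load4_noabort _h_asan_load1_noabort _h_asan_load2_noabort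
  · exact h_decode_residue_6bb Lay _hLay μ _hμ u₀ _hcode _h_asan_load8_noabort _h_codebook_decode_deinterleave_repeat

end Vorbis.Spec.Splits
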